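-- pv_equiv track=rewrite | github.com/Viciooo/WDI_zestawy | Ciekawe_zadania.py | ex6
-- ===== SOURCE A (Python) =====
-- def PrimeDivList(n): #zwraca listę podzielników pierwszych w postaci tablicy
--     l = []
--     for i in range(2,n+1):
--         if n % i == 0:
--             l.append(i)
--         while n % i == 0:
--             n //= i
--     return l
--
-- def ex6(t1,t2):
-- #Zad. 1. Dane są dwie tablice int t1[N], int t2[N] wypełnione liczbami naturalnymi. Proszę napisać funkcję, która
-- #sprawdza czy z każdej z tablic można wyciąć po jednym kawałku, tak aby suma elementów w obu kawałkach była: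
-- #iloczynem dokładnie dwóch liczb pierwszych. Oba kawałki powinny być jednakowej długości.
--     N = len(t1)
--     for x in range(1,N): #długość wycinków
--         for s1 in range(N-1): #s - start - 1st index wycinka
--             if s1+x >= N:
--                 break
--             suma1 = 0
--             cnt = 0
--             for i in range(s1,s1+x):
--                 suma1 += t1[i]
--                 cnt += 1
--             t_cnt = cnt
--             for s2 in range(N-1):
--                 if s2+x >= N:
--                     break
--                 cnt = t_cnt
--                 suma2 = 0
--                 for i in range(s2,s2+x):
--                     cnt += 1
--                     suma2 += t2[i]
--                 l = PrimeDivList(suma1+suma2)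
--                 if len(l) == 2 and l[0]*l[1] == suma1+suma2:
--                     return True
--     return False
-- ===== SOURCE B (Python) =====
-- def _is_prime(m):
--     if m < 2:
--         return False
--     d = 2
--     while d * d <= m:
--         if m % d == 0:
--             return False
--         d += 1
--     return True
--
--
-- def _two_distinct_primes(n):
--     # n == p*q for distinct primes p, q  <=>  its smallest divisor d satisfies
--     # d*d <= n and n//d is a prime different from d
--     if n < 6:
--         return False
--     d = 2
--     while d * d <= n:
--         if n % d == 0:
--             m = n // d
--             return m != d and _is_prime(m)
--         d += 1
--     return False
--
--
-- def ex6(t1, t2):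
--     n = len(t1)
--     pre1 = [0]
--     for v in t1:
--         pre1.append(pre1[-1] + v)
--     pre2 = [0]
--     for v in t2:
--         pre2.append(pre2[-1] + v)
--     return any(
--         _two_distinct_primes(pre1[s1 + x] - pre1[s1] + pre2[s2 + x] - pre2[s2])
--         for x in range(1, n)
--         for s1 in range(n - x)
--         for s2 in range(n - x))
-- ===== Notes on version B (the rewrite author's own statement) =====
-- stated objective: faster
-- what changed: B precomputes prefix-sum arrays so each window sum is O(1) instead of an inner summation loop, and tests 'product of two distinct primes' by trial division up to sqrt(S) (smallest divisor d, then a primality test of S//d) instead of A's full factorization loop running up to S.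
-- outside the precondition, e.g. on ex6([2, 9, 9], [4]): A returns True, B returns True
import Mathlib
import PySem

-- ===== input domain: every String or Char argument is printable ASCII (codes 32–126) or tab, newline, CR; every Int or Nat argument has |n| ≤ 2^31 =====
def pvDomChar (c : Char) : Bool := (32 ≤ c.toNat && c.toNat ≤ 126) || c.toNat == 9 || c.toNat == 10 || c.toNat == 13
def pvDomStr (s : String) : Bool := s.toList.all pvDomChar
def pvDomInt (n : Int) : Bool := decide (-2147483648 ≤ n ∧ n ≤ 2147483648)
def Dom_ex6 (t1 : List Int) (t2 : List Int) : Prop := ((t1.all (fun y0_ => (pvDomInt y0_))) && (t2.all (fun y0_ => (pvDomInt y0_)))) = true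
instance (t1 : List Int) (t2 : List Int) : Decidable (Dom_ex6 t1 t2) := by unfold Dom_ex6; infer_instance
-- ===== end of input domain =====

-- B replaces A's inner summation loops by prefix-sum arrays (O(1) window sums) and A's
-- full factorization loop (up to the sum S) by trial division up to sqrt(S); equal on Pre_.

-- ===== PORT A =====

-- the `while n % i == 0: n //= i` loop of PrimeDivList; the `2 ≤ i ∧ 1 ≤ m` guard only
-- makes the recursion total (every call site has i ≥ 2, m ≥ 1, where Python's loop terminates)
def pvStrip (m i : Int) : Int :=
  if h : 2 ≤ i ∧ 1 ≤ m ∧ PySem.Int.mod m i = 0 then pvStrip (PySem.Int.floordiv m i) i else m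
termination_by m.toNat
decreasing_by
  obtain ⟨h1, h2, h3⟩ := h
  obtain ⟨k, hk⟩ : i ∣ m := (PySem.Int.mod_eq_zero_iff_dvd m i).mp h3
  have hfd : PySem.Int.floordiv m i = k := by
    rw [PySem.Int.floordiv_eq_ediv_of_pos (by omega), hk, Int.mul_ediv_cancel_left _ (by omega)]
  have hk1 : 1 ≤ k := by nlinarith
  have hkm : k < m := by nlinarith
  rw [hfd]; omega

-- PrimeDivList(n): for i in range(2, n+1): if n % i == 0: l.append(i); while n % i == 0: n //= i
def primeDivList (n : Int) : List Int :=
  ((PySem.List.pyRange 2 (n + 1)).foldl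
    (fun st i => (pvStrip st.1 i, if PySem.Int.mod st.1 i = 0 then st.2 ++ [i] else st.2))
    (n, ([] : List Int))).2

-- `len(l) == 2 and l[0]*l[1] == s` (the l[0]/l[1] accesses are guarded by len(l) == 2)
def pvCheckA (s : Int) : Bool :=
  let l := primeDivList s
  (PySem.List.len l == 2) && (PySem.List.pyGetD l 0 0 * PySem.List.pyGetD l 1 0 == s)

-- the s2-loop (early `return True` = short-circuit true, `break` = false);
-- the Python also keeps a counter `cnt` here, which is never read (dead code)
def pvLoop3 (t2 : List Int) (N x suma1 : Int) : List Int → Bool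
  | [] => false
  | s2 :: rest =>
    if s2 + x ≥ N then false
    else
      let suma2 := (PySem.List.pyRange s2 (s2 + x)).foldl
        (fun acc i => acc + PySem.List.pyGetD t2 i 0) 0
      if pvCheckA (suma1 + suma2) then true else pvLoop3 t2 N x suma1 rest

-- the s1-loop (`cnt`/`t_cnt` of the Python are dead code and not kept)
def pvLoop2 (t1 t2 : List Int) (N x : Int) : List Int → Bool
  | [] => false
  | s1 :: rest =>
    if s1 + x ≥ N then false
    else
      let suma1 := (PySem.List.pyRange s1 (s1 + x)).foldl
        (fun acc i => acc + PySem.List.pyGetD t1 i 0) 0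
      if pvLoop3 t2 N x suma1 (PySem.List.pyRange 0 (N - 1)) then true
      else pvLoop2 t1 t2 N x rest

-- the x-loop
def pvLoop1 (t1 t2 : List Int) (N : Int) : List Int → Bool
  | [] => false
  | x :: rest =>
    if pvLoop2 t1 t2 N x (PySem.List.pyRange 0 (N - 1)) then true
    else pvLoop1 t1 t2 N rest

def ex6 (t1 : List Int) (t2 : List Int) : Bool :=
  let N := PySem.List.len t1
  pvLoop1 t1 t2 N (PySem.List.pyRange 1 N)

-- ===== PORT B =====

-- _is_prime: trial division while d*d <= m
def pvTrialPrime (m d : Int) : Bool :=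
  if d * d ≤ m then
    (if PySem.Int.mod m d = 0 then false else pvTrialPrime m (d + 1))
  else true
termination_by (m + 1 - d).toNat
decreasing_by
  rename_i h
  by_cases hd : d ≤ 0
  · have : 0 ≤ d * d := by nlinarith
    omega
  · have : d * 1 ≤ d * d := by nlinarith
    omega

def pvIsPrime (m : Int) : Bool :=
  if m < 2 then false else pvTrialPrime m 2

-- _two_distinct_primes' while loop: first divisor d with d*d <= n, then n//d must be a
-- prime different from d
def pvP2Loop (n d : Int) : Bool :=
  if d * d ≤ n then
    (if PySem.Int.mod n d = 0 then
      (let m := PySem.Int.floordiv n d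
       (m != d) && pvIsPrime m)
     else pvP2Loop n (d + 1))
  else false
termination_by (n + 1 - d).toNat
decreasing_by
  rename_i h
  by_cases hd : d ≤ 0
  · have : 0 ≤ d * d := by nlinarith
    omega
  · have : d * 1 ≤ d * d := by nlinarith
    omega

def pvIsP2 (n : Int) : Bool :=
  if n < 6 then false else pvP2Loop n 2

-- _prefix(t): p = [0]; for v in t: p.append(p[-1] + v)
def pvPrefix (t : List Int) : List Int :=
  t.foldl (fun P v => P ++ [PySem.List.pyGetD P (-1) 0 + v]) [0]

def ex6_alt (t1 : List Int) (t2 : List Int) : Bool :=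
  let N := PySem.List.len t1
  let pre1 := pvPrefix t1
  let pre2 := pvPrefix t2
  (PySem.List.pyRange 1 N).any fun x =>
    (PySem.List.pyRange 0 (N - x)).any fun s1 =>
      (PySem.List.pyRange 0 (N - x)).any fun s2 =>
        pvIsP2 (PySem.List.pyGetD pre1 (s1 + x) 0 - PySem.List.pyGetD pre1 s1 0 +
                PySem.List.pyGetD pre2 (s2 + x) 0 - PySem.List.pyGetD pre2 s2 0)

-- ===== PRECONDITION & SPEC =====

-- A indexes t2 up to len(t1)-2 while looping; when len(t2) < len(t1)-1 it raises
-- IndexError unless an early qualifying window pair returns True first, so those shapes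
-- are excluded (B's prefix-array indexing raises at exactly the same loop point).
def Pre_ex6 (t1 : List Int) (t2 : List Int) : Prop := t1.length ≤ t2.length + 1
instance (t1 : List Int) (t2 : List Int) : Decidable (Pre_ex6 t1 t2) := by
  unfold Pre_ex6; infer_instance

def pvWitness_ex6 : List Int × List Int := ([1, 2, 3], [1, 2, 3])

def Spec_ex6 (t1 : List Int) (t2 : List Int) (out : Bool) : Prop := out = ex6_alt t1 t2
instance (t1 : List Int) (t2 : List Int) (out : Bool) : Decidable (Spec_ex6 t1 t2 out) := by
  unfold Spec_ex6; infer_instance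

-- ===== CLAIM (what is proved, stated in full; the proofs are below) =====
def Claim_equal_ex6 : Prop :=
  ∀ (t1 : List Int) (t2 : List Int), Dom_ex6 t1 t2 → Pre_ex6 t1 t2 → Spec_ex6 t1 t2 (ex6 t1 t2)

-- ===== LEMMAS AND PROOFS =====

-- "s is a product of two distinct primes": the property both sides' tests decide
def pvSem (s : Int) : Prop :=
  ∃ p q : ℕ, p.Prime ∧ q.Prime ∧ p < q ∧ s = (p : Int) * q

-- every c ≥ 2 has a prime factor (bounded by c)
theorem pv_small_prime_factor (c : Int) (hc : 2 ≤ c) :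
    ∃ r : ℕ, r.Prime ∧ (r : Int) ∣ c ∧ (r : Int) ≤ c := by
  refine ⟨c.toNat.minFac, Nat.minFac_prime (by omega), ?_, ?_⟩
  · have h := Nat.minFac_dvd c.toNat
    have : (c.toNat.minFac : Int) ∣ (c.toNat : Int) := Int.natCast_dvd_natCast.mpr h
    rwa [Int.toNat_of_nonneg (by omega)] at this
  · have h := Nat.minFac_le (by omega : 0 < c.toNat)
    omega

-- ---- characterization of pvStrip ----
theorem pvStrip_spec (m i : Int) (hm : 1 ≤ m) (hi : 2 ≤ i) :
    ∃ k : ℕ, m = i ^ k * pvStrip m i ∧ ¬ i ∣ pvStrip m i ∧ 1 ≤ pvStrip m i := by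
  by_cases hdvd : PySem.Int.mod m i = 0
  · obtain ⟨c, hc⟩ := (PySem.Int.mod_eq_zero_iff_dvd m i).mp hdvd
    have hfd : PySem.Int.floordiv m i = c := by
      rw [PySem.Int.floordiv_eq_ediv_of_pos (by omega), hc, Int.mul_ediv_cancel_left _ (by omega)]
    have hc1 : 1 ≤ c := by nlinarith
    obtain ⟨k, h1, h2, h3⟩ := pvStrip_spec c i hc1 hi
    have hstep : pvStrip m i = pvStrip c i := by
      rw [pvStrip, dif_pos ⟨hi, hm, hdvd⟩, hfd]
    refine ⟨k + 1, ?_, by rw [hstep]; exact h2, by rw [hstep]; exact h3⟩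
    rw [hstep, hc]
    conv_lhs => rw [h1]
    ring
  · have hstep : pvStrip m i = m := by
      rw [pvStrip, dif_neg (by tauto)]
    exact ⟨0, by rw [hstep]; ring,
      by rw [hstep]; exact fun hd => hdvd ((PySem.Int.mod_eq_zero_iff_dvd m i).mpr hd),
      by rw [hstep]; exact hm⟩
termination_by m.toNat
decreasing_by
  have : c < m := by nlinarith
  omega

-- ---- invariant of PrimeDivList's loop ----
def pvInv (n j : Int) (st : Int × List Int) : Prop :=
  1 ≤ st.1 ∧ st.1 ∣ n ∧
  (∀ p : ℕ, p.Prime → (p : Int) ∣ st.1 → j < (p : Int)) ∧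
  (∀ p : ℕ, p.Prime → j < (p : Int) → ((p : Int) ∣ n ↔ (p : Int) ∣ st.1)) ∧
  (∀ a ∈ st.2, 2 ≤ a ∧ a.toNat.Prime ∧ a ∣ n ∧ a ≤ j) ∧
  (∀ p : ℕ, p.Prime → (p : Int) ∣ n → (p : Int) ≤ j → (p : Int) ∈ st.2) ∧
  st.2.Pairwise (· < ·)

theorem pvInv_step (n j : Int) (st : Int × List Int) (hj : 1 ≤ j) (hinv : pvInv n j st) :
    pvInv n (j + 1)
      (pvStrip st.1 (j + 1),
       if PySem.Int.mod st.1 (j + 1) = 0 then st.2 ++ [j + 1] else st.2) := by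
  obtain ⟨h1, h2, h3, h4, h5, h6, h7⟩ := hinv
  have hi : 2 ≤ j + 1 := by omega
  obtain ⟨k, hmk, hnd, hs1⟩ := pvStrip_spec st.1 (j + 1) h1 hi
  have hsd : pvStrip st.1 (j + 1) ∣ st.1 := by
    refine ⟨(j + 1) ^ k, ?_⟩
    conv_lhs => rw [hmk]
    ring
  have hdvd_iff : ∀ p : ℕ, p.Prime → ¬ (p : Int) ∣ (j + 1) →
      ((p : Int) ∣ st.1 ↔ (p : Int) ∣ pvStrip st.1 (j + 1)) := by
    intro p hp hpi
    constructor
    · intro hpm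
      have hpInt : Prime ((p : Int)) := Nat.prime_iff_prime_int.mp hp
      rw [hmk] at hpm
      rcases hpInt.dvd_mul.mp hpm with h | h
      · exact absurd (hpInt.dvd_of_dvd_pow h) hpi
      · exact h
    · intro h; exact h.trans hsd
  by_cases hidvd : PySem.Int.mod st.1 (j + 1) = 0
  · have hidvd' : (j + 1) ∣ st.1 := (PySem.Int.mod_eq_zero_iff_dvd _ _).mp hidvd
    have hiprime : (j + 1).toNat.Prime := by
      obtain ⟨r, hr, hrd, hrle⟩ := pv_small_prime_factor (j + 1) hi
      have hrm : (r : Int) ∣ st.1 := hrd.trans hidvd'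
      have hgt := h3 r hr hrm
      have hre : (j + 1).toNat = r := by omega
      rwa [hre]
    simp only [if_pos hidvd]
    refine ⟨hs1, hsd.trans h2, ?_, ?_, ?_, ?_, ?_⟩
    · intro p hp hps
      have hpm : (p : Int) ∣ st.1 := hps.trans hsd
      have hgt := h3 p hp hpm
      have hne : (p : Int) ≠ j + 1 := by
        intro heq; rw [heq] at hps; exact hnd hps
      omega
    · intro p hp hpgt
      have hpi : ¬ (p : Int) ∣ (j + 1) := by
        intro hd
        have := Int.le_of_dvd (by omega) hd
        omega
      rw [h4 p hp (by omega), hdvd_iff p hp hpi]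
    · intro a ha
      rcases List.mem_append.mp ha with h | h
      · obtain ⟨ha1, ha2, ha3, ha4⟩ := h5 a h
        exact ⟨ha1, ha2, ha3, by omega⟩
      · have : a = j + 1 := by simpa using h
        subst this
        exact ⟨hi, hiprime, hidvd'.trans h2, le_refl _⟩
    · intro p hp hpn hple
      by_cases hgt : j < (p : Int)
      · have : (p : Int) = j + 1 := by omega
        simp [this]
      · exact List.mem_append.mpr (Or.inl (h6 p hp hpn (by omega)))
    · rw [List.pairwise_append]
      refine ⟨h7, List.pairwise_singleton _ _, ?_⟩
      intro a ha b hb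
      have hb' : b = j + 1 := by simpa using hb
      subst hb'
      have := (h5 a ha).2.2.2
      omega
  · have hnidvd : ¬ (j + 1) ∣ st.1 :=
      fun h => hidvd ((PySem.Int.mod_eq_zero_iff_dvd _ _).mpr h)
    have hstrip_eq : pvStrip st.1 (j + 1) = st.1 := by
      rw [pvStrip, dif_neg (by tauto)]
    simp only [if_neg hidvd, hstrip_eq]
    refine ⟨h1, h2, ?_, ?_, ?_, ?_, h7⟩
    · intro p hp hpm
      have := h3 p hp hpm
      have hne : (p : Int) ≠ j + 1 := by
        intro heq; rw [heq] at hpm; exact hnidvd hpm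
      omega
    · intro p hp hpgt
      exact h4 p hp (by omega)
    · intro a ha
      obtain ⟨x1, x2, x3, x4⟩ := h5 a ha
      exact ⟨x1, x2, x3, by omega⟩
    · intro p hp hpn hple
      by_cases hgt : j < (p : Int)
      · have hpe : (p : Int) = j + 1 := by omega
        have : (p : Int) ∣ st.1 := (h4 p hp (by omega)).mp hpn
        exact absurd (hpe ▸ this) hnidvd
      · exact h6 p hp hpn (by omega)

theorem pvInv_fold (n j : Int) (st : Int × List Int) (hj : 1 ≤ j) (hjn : j ≤ n)
    (hinv : pvInv n j st) :
    pvInv n n ((PySem.List.pyRange (j + 1) (n + 1)).foldl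
      (fun st i => (pvStrip st.1 i, if PySem.Int.mod st.1 i = 0 then st.2 ++ [i] else st.2)) st) := by
  rcases eq_or_lt_of_le hjn with heq | hlt
  · subst heq
    rw [PySem.List.pyRange_one_eq_nil (by omega)]
    exact hinv
  · rw [PySem.List.pyRange_one_cons (by omega), List.foldl_cons]
    exact pvInv_fold n (j + 1)
      (pvStrip st.1 (j + 1),
       if PySem.Int.mod st.1 (j + 1) = 0 then st.2 ++ [j + 1] else st.2)
      (by omega) (by omega) (pvInv_step n j st hj hinv)
termination_by (n - j).toNat
decreasing_by omega

theorem primeDivList_char (n : Int) (hn : 1 ≤ n) :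
    (∀ a ∈ primeDivList n, 2 ≤ a ∧ a.toNat.Prime ∧ a ∣ n) ∧
    (∀ p : ℕ, p.Prime → (p : Int) ∣ n → (p : Int) ∈ primeDivList n) ∧
    (primeDivList n).Pairwise (· < ·) := by
  have hbase : pvInv n 1 (n, []) := by
    refine ⟨hn, dvd_refl n, ?_, fun p hp _ => Iff.rfl, by simp, ?_, List.Pairwise.nil⟩
    · intro p hp _
      have := hp.two_le
      omega
    · intro p hp _ hle
      have := hp.two_le
      exfalso; omega
  have hfold := pvInv_fold n 1 (n, []) le_rfl hn hbase
  have hpd : primeDivList n = ((PySem.List.pyRange (1 + 1) (n + 1)).foldl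
      (fun st i => (pvStrip st.1 i, if PySem.Int.mod st.1 i = 0 then st.2 ++ [i] else st.2))
      (n, ([] : List Int))).2 := by
    unfold primeDivList
    norm_num
  obtain ⟨g1, g2, g3, g4, g5, g6, g7⟩ := hfold
  refine ⟨?_, ?_, ?_⟩
  · intro a ha
    rw [hpd] at ha
    obtain ⟨x1, x2, x3, _⟩ := g5 a ha
    exact ⟨x1, x2, x3⟩
  · intro p hp hpn
    rw [hpd]
    exact g6 p hp hpn (Int.le_of_dvd (by omega) hpn)
  · rw [hpd]; exact g7

theorem pvCheckA_iff (s : Int) : pvCheckA s = true ↔ pvSem s := by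
  by_cases hs : 1 ≤ s
  · obtain ⟨hmem, hall, hpw⟩ := primeDivList_char s hs
    rw [pvCheckA]
    simp only [PySem.List.len_eq, Bool.and_eq_true, beq_iff_eq]
    constructor
    · rintro ⟨hlen, hprod⟩
      have hlen2 : (primeDivList s).length = 2 := by exact_mod_cast hlen
      obtain ⟨u, v, huv⟩ := List.length_eq_two.mp hlen2
      rw [huv] at hprod hpw
      simp only [PySem.List.pyGetD_ofNat', List.getD_cons_zero, List.getD_cons_succ] at hprod
      obtain ⟨hu2, hup, _⟩ := hmem u (by rw [huv]; simp)
      obtain ⟨hv2, hvp, _⟩ := hmem v (by rw [huv]; simp)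
      have hultv : u < v := (List.pairwise_cons.mp hpw).1 v (by simp)
      refine ⟨u.toNat, v.toNat, hup, hvp, by omega, ?_⟩
      rw [Int.toNat_of_nonneg (by omega), Int.toNat_of_nonneg (by omega)]
      exact hprod.symm
    · rintro ⟨p, q, hp, hq, hpq, rfl⟩
      have hpin : ((p : Int)) ∈ primeDivList ((p : Int) * q) := hall p hp (dvd_mul_right _ _)
      have hqin : ((q : Int)) ∈ primeDivList ((p : Int) * q) := hall q hq (dvd_mul_left _ _)
      have hmem' : ∀ a ∈ primeDivList ((p : Int) * q), a = (p : Int) ∨ a = (q : Int) := by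
        intro a ha
        obtain ⟨ha2, hap, had⟩ := hmem a ha
        have hcast : (a.toNat : Int) = a := Int.toNat_of_nonneg (by omega)
        have hnat : a.toNat ∣ p * q := by
          have : (a.toNat : Int) ∣ ((p : Int) * q) := by rw [hcast]; exact had
          exact_mod_cast this
        rcases (Nat.Prime.dvd_mul hap).mp hnat with h | h
        · left
          have := (Nat.prime_dvd_prime_iff_eq hap hp).mp h
          omega
        · right
          have := (Nat.prime_dvd_prime_iff_eq hap hq).mp h
          omega
      have hpq' : ((p : Int)) < (q : Int) := by exact_mod_cast hpq
      have hl : primeDivList ((p : Int) * q) = [(p : Int), (q : Int)] := by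
        cases hll : primeDivList ((p : Int) * q) with
        | nil => rw [hll] at hpin; simp at hpin
        | cons a t =>
          cases t with
          | nil =>
            rw [hll] at hpin hqin
            simp at hpin hqin
            omega
          | cons b t2 =>
            cases t2 with
            | nil =>
              rw [hll] at hpin hqin hpw hmem'
              have hab := (List.pairwise_cons.mp hpw).1 b (by simp)
              have h1 := hmem' a (by simp)
              have h2 := hmem' b (by simp)
              simp at hpin hqin
              have hfin : a = (p : Int) ∧ b = (q : Int) := by
                rcases h1 with h | h <;> rcases h2 with h' | h' <;> omega
              rw [hfin.1, hfin.2]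
            | cons c t3 =>
              exfalso
              rw [hll] at hpw hmem'
              have h1 := hmem' a (by simp)
              have h2 := hmem' b (by simp)
              have h3 := hmem' c (by simp)
              have pc := List.pairwise_cons.mp hpw
              have hab := pc.1 b (by simp)
              have hac := pc.1 c (by simp)
              have hbc := (List.pairwise_cons.mp pc.2).1 c (by simp)
              rcases h1 with h | h <;> rcases h2 with h' | h' <;> rcases h3 with h'' | h'' <;> omega
      refine ⟨by rw [hl]; simp, ?_⟩
      rw [hl]
      simp [PySem.List.pyGetD_ofNat']
  · have hl : primeDivList s = [] := by
      unfold primeDivList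
      rw [PySem.List.pyRange_one_eq_nil (by omega)]
      rfl
    constructor
    · intro h
      rw [pvCheckA] at h
      simp [hl, PySem.List.len_eq] at h
    · rintro ⟨p, q, hp, hq, hpq, rfl⟩
      have h1 : 0 < p * q := Nat.mul_pos hp.pos hq.pos
      have h2 : ((p : Int) * q) = ((p * q : ℕ) : Int) := by push_cast; ring
      omega

-- ---- B's tests ----
theorem pvTrial_iff (m d : Int) (hd : 2 ≤ d) :
    pvTrialPrime m d = true ↔ ∀ c : Int, d ≤ c → c * c ≤ m → ¬ c ∣ m := by
  by_cases hle : d * d ≤ m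
  · by_cases hdvd : PySem.Int.mod m d = 0
    · rw [pvTrialPrime, if_pos hle, if_pos hdvd]
      constructor
      · intro h; exact absurd h (by simp)
      · intro h
        exact (h d le_rfl hle ((PySem.Int.mod_eq_zero_iff_dvd m d).mp hdvd)).elim
    · have hd' : ¬ d ∣ m := fun hx => hdvd ((PySem.Int.mod_eq_zero_iff_dvd m d).mpr hx)
      rw [pvTrialPrime, if_pos hle, if_neg hdvd, pvTrial_iff m (d + 1) (by omega)]
      constructor
      · intro h c hc hcc hcd
        rcases eq_or_lt_of_le hc with heq | hlt
        · exact hd' (heq ▸ hcd)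
        · exact h c (by omega) hcc hcd
      · intro h c hc hcc
        exact h c (by omega) hcc
  · rw [pvTrialPrime, if_neg hle]
    constructor
    · intro _ c hc hcc hcd
      have : d * d ≤ c * c := by nlinarith
      omega
    · intro _; rfl
termination_by (m + 1 - d).toNat
decreasing_by
  have : d * 1 ≤ d * d := by nlinarith
  omega

theorem pv_dvd_toNat (c m : Int) (hc : 0 ≤ c) (hm : 0 ≤ m) : c ∣ m ↔ c.toNat ∣ m.toNat := by
  have h := Int.natCast_dvd_natCast (m := c.toNat) (n := m.toNat)
  rw [Int.toNat_of_nonneg hc, Int.toNat_of_nonneg hm] at h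
  exact h

theorem pvIsPrime_iff (m : Int) : pvIsPrime m = true ↔ 2 ≤ m ∧ m.toNat.Prime := by
  rw [pvIsPrime]
  by_cases hm : m < 2
  · rw [if_pos hm]
    constructor
    · intro h; exact absurd h (by simp)
    · rintro ⟨h1, _⟩; omega
  · rw [if_neg hm, pvTrial_iff m 2 le_rfl]
    constructor
    · intro h
      refine ⟨by omega, ?_⟩
      rw [Nat.prime_def_le_sqrt]
      refine ⟨by omega, ?_⟩
      intro a ha hsq hdvd
      have h1 : a * a ≤ m.toNat := Nat.le_sqrt.mp hsq
      have h2 : ((a : Int)) * a ≤ m := by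
        have := Int.ofNat_le.mpr h1
        push_cast at this
        rwa [Int.toNat_of_nonneg (by omega)] at this
      have h3 : ((a : Int)) ∣ m := by
        rw [pv_dvd_toNat _ _ (by omega) (by omega), Int.toNat_natCast]
        exact hdvd
      exact h ((a : Int)) (by exact_mod_cast ha) h2 h3
    · rintro ⟨h2, hp⟩ c hc hcc hcd
      rw [Nat.prime_def_le_sqrt] at hp
      have hcn : c.toNat ∣ m.toNat := (pv_dvd_toNat c m (by omega) (by omega)).mp hcd
      refine hp.2 c.toNat (by omega) ?_ hcn
      refine Nat.le_sqrt.mpr ?_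
      have e1 : ((c.toNat : ℤ)) = c := Int.toNat_of_nonneg (by omega)
      have : ((c.toNat * c.toNat : ℕ) : ℤ) ≤ ((m.toNat : ℕ) : ℤ) := by
        push_cast
        rw [e1, Int.toNat_of_nonneg (by omega)]
        exact hcc
      exact_mod_cast this

theorem pvP2Loop_iff (n d : Int) (hd : 2 ≤ d) :
    pvP2Loop n d = true ↔
      ∃ e : Int, d ≤ e ∧ e * e ≤ n ∧ e ∣ n ∧ (∀ c : Int, d ≤ c → c < e → ¬ c ∣ n) ∧
        PySem.Int.floordiv n e ≠ e ∧ pvIsPrime (PySem.Int.floordiv n e) = true := by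
  by_cases hle : d * d ≤ n
  · by_cases hdvd : PySem.Int.mod n d = 0
    · have hd' : d ∣ n := (PySem.Int.mod_eq_zero_iff_dvd n d).mp hdvd
      rw [pvP2Loop]
      simp only [if_pos hle, if_pos hdvd, Bool.and_eq_true, bne_iff_ne, ne_eq]
      constructor
      · rintro ⟨hne, hpr⟩
        exact ⟨d, le_rfl, hle, hd', fun c hc hlt _ => absurd hlt (by omega), hne, hpr⟩
      · rintro ⟨e, he1, he2, he3, hmin, hne, hpr⟩
        have hed : e = d := by
          by_contra hx
          exact hmin d le_rfl (by omega) hd'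
        subst hed
        exact ⟨hne, hpr⟩
    · have hd' : ¬ d ∣ n := fun hx => hdvd ((PySem.Int.mod_eq_zero_iff_dvd n d).mpr hx)
      rw [pvP2Loop, if_pos hle, if_neg hdvd, pvP2Loop_iff n (d + 1) (by omega)]
      constructor
      · rintro ⟨e, he1, he2, he3, hmin, hne, hpr⟩
        refine ⟨e, by omega, he2, he3, ?_, hne, hpr⟩
        intro c hc hlt hcd
        rcases eq_or_lt_of_le hc with heq | h
        · exact hd' (heq ▸ hcd)
        · exact hmin c (by omega) hlt hcd
      · rintro ⟨e, he1, he2, he3, hmin, hne, hpr⟩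
        have hed : d < e := by
          rcases eq_or_lt_of_le he1 with heq | h
          · exact absurd (heq ▸ he3) hd'
          · exact h
        exact ⟨e, by omega, he2, he3, fun c hc hlt hcd => hmin c (by omega) hlt hcd, hne, hpr⟩
  · rw [pvP2Loop, if_neg hle]
    constructor
    · intro h; exact absurd h (by simp)
    · rintro ⟨e, he1, he2, _, _, _, _⟩
      exfalso
      have : d * d ≤ e * e := by nlinarith
      omega
termination_by (n + 1 - d).toNat
decreasing_by
  have : d * 1 ≤ d * d := by nlinarith
  omega

theorem pvIsP2_iff (s : Int) : pvIsP2 s = true ↔ pvSem s := by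
  rw [pvIsP2]
  by_cases hs : s < 6
  · rw [if_pos hs]
    constructor
    · intro h; exact absurd h (by simp)
    · rintro ⟨p, q, hp, hq, hpq, rfl⟩
      exfalso
      have h2 : (2 : Int) ≤ p := by exact_mod_cast hp.two_le
      have h3 : (3 : Int) ≤ q := by
        have := hq.two_le
        have : (2 : Int) ≤ q := by exact_mod_cast this
        omega
      nlinarith
  · rw [if_neg hs, pvP2Loop_iff s 2 le_rfl]
    constructor
    · rintro ⟨e, he1, he2, he3, hmin, hne, hpr⟩
      obtain ⟨hm2, hmp⟩ := (pvIsPrime_iff _).mp hpr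
      have heprime : e.toNat.Prime := by
        obtain ⟨r, hr, hrd, hrle⟩ := pv_small_prime_factor e (by omega)
        have hrn : (r : Int) ∣ s := hrd.trans he3
        have hnlt : ¬ ((r : Int) < e) := fun hlt =>
          hmin r (by exact_mod_cast hr.two_le) hlt hrn
        have hre : e.toNat = r := by omega
        rwa [hre]
      have hfd : PySem.Int.floordiv s e * e = s := by
        rw [PySem.Int.floordiv_eq_ediv_of_pos (by omega : (0:Int) < e)]
        exact Int.ediv_mul_cancel he3
      have hcast_e : ((e.toNat : ℤ)) = e := Int.toNat_of_nonneg (by omega)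
      have hcast_m : (((PySem.Int.floordiv s e).toNat : ℤ)) = PySem.Int.floordiv s e :=
        Int.toNat_of_nonneg (by omega)
      rcases lt_trichotomy e (PySem.Int.floordiv s e) with h | h | h
      · refine ⟨e.toNat, (PySem.Int.floordiv s e).toNat, heprime, hmp, by omega, ?_⟩
        rw [hcast_e, hcast_m, mul_comm]
        exact hfd.symm
      · exact absurd h.symm hne
      · refine ⟨(PySem.Int.floordiv s e).toNat, e.toNat, hmp, heprime, by omega, ?_⟩
        rw [hcast_m, hcast_e]
        exact hfd.symm
    · rintro ⟨p, q, hp, hq, hpq, rfl⟩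
      have h2 : (2 : Int) ≤ p := by exact_mod_cast hp.two_le
      have h3 : (2 : Int) ≤ q := by exact_mod_cast hq.two_le
      have hpq' : ((p : Int)) < q := by exact_mod_cast hpq
      have hfd : PySem.Int.floordiv ((p : Int) * q) (p : Int) = q := by
        rw [PySem.Int.floordiv_eq_ediv_of_pos (by omega), Int.mul_ediv_cancel_left _ (by omega)]
      refine ⟨(p : Int), h2, by nlinarith, dvd_mul_right _ _, ?_, ?_, ?_⟩
      · intro c hc hlt hcd
        obtain ⟨r, hr, hrd, hrle⟩ := pv_small_prime_factor c (by omega)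
        have hrn : (r : Int) ∣ (p : Int) * q := hrd.trans hcd
        have hrnat : r ∣ p * q := by exact_mod_cast hrn
        rcases (Nat.Prime.dvd_mul hr).mp hrnat with h | h
        · have := (Nat.prime_dvd_prime_iff_eq hr hp).mp h
          omega
        · have := (Nat.prime_dvd_prime_iff_eq hr hq).mp h
          omega
      · rw [hfd]; omega
      · rw [hfd, pvIsPrime_iff]
        exact ⟨h3, by simpa using hq⟩

theorem pv_pred_eq (s : Int) : pvCheckA s = pvIsP2 s := by
  have h1 := pvCheckA_iff s
  have h2 := pvIsP2_iff s
  cases hA : pvCheckA s <;> cases hB : pvIsP2 s <;> simp_all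

-- ---- prefix sums ----
theorem pvPrefix_aux (t : List Int) : ∀ acc : List Int,
    t.foldl (fun P v => P ++ [PySem.List.pyGetD P (-1) 0 + v]) acc =
      acc ++ (List.range t.length).map
        (fun i => PySem.List.pyGetD acc (-1) 0 + (t.take (i + 1)).sum) := by
  induction t with
  | nil => intro acc; simp
  | cons v t ih =>
    intro acc
    simp only [List.foldl_cons]
    rw [ih (acc ++ [PySem.List.pyGetD acc (-1) 0 + v])]
    rw [PySem.List.pyGetD_neg_one_append_singleton]
    rw [List.append_assoc]
    congr 1
    rw [List.length_cons, List.range_succ_eq_map]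
    simp only [List.map_cons, List.map_map, List.take_succ_cons, List.sum_cons,
      List.take_zero, List.sum_nil, add_zero, List.singleton_append]
    congr 1
    apply List.map_congr_left
    intro i _
    simp only [Function.comp_apply]
    ring

theorem pvPrefix_eq (t : List Int) :
    pvPrefix t = (List.range (t.length + 1)).map (fun i => (t.take i).sum) := by
  unfold pvPrefix
  rw [pvPrefix_aux]
  have h0 : PySem.List.pyGetD [(0 : Int)] (-1) 0 = 0 := by decide
  rw [h0]
  rw [List.range_succ_eq_map]
  simp only [List.map_cons, List.map_map, List.take_zero, List.sum_nil,
    List.singleton_append, zero_add]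
  rfl

theorem pvPrefix_getD (t : List Int) (k : ℕ) (hk : k ≤ t.length) :
    PySem.List.pyGetD (pvPrefix t) (k : Int) 0 = (t.take k).sum := by
  rw [pvPrefix_eq, PySem.List.pyGetD_natCast, PySem.List.getD_map_range _ _ _ _ (by omega)]

theorem pv_sum_range_window (t : List Int) (a b : ℕ) (h : a + b ≤ t.length) :
    ((List.range b).map (fun k => t.getD (a + k) 0)).sum =
      (t.take (a + b)).sum - (t.take a).sum := by
  induction b with
  | zero => simp
  | succ b ih =>
    rw [List.range_succ, List.map_append, List.sum_append]
    rw [ih (by omega)]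
    have hlt : a + b < t.length := by omega
    simp only [List.map_cons, List.map_nil, List.sum_cons, List.sum_nil, add_zero]
    rw [List.getD_eq_getElem _ _ hlt]
    rw [show a + (b + 1) = (a + b) + 1 from rfl]
    rw [List.take_add_one, List.getElem?_eq_getElem hlt]
    simp only [Option.toList_some, List.sum_append, List.sum_cons, List.sum_nil, add_zero]
    ring

theorem pv_window_sum (t : List Int) (s x : Int) (hs : 0 ≤ s) (hx : 0 ≤ x)
    (hlen : s + x ≤ (t.length : Int)) :
    (PySem.List.pyRange s (s + x)).foldl (fun acc i => acc + PySem.List.pyGetD t i 0) 0 =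
      PySem.List.pyGetD (pvPrefix t) (s + x) 0 - PySem.List.pyGetD (pvPrefix t) s 0 := by
  obtain ⟨a, rfl⟩ := Int.eq_ofNat_of_zero_le hs
  obtain ⟨b, rfl⟩ := Int.eq_ofNat_of_zero_le hx
  have hab : a + b ≤ t.length := by
    have := hlen
    omega
  rw [PySem.List.foldl_add, PySem.List.pyRange_one]
  have hbn : (((a : Int) + b - a).toNat) = b := by omega
  rw [hbn, List.map_map]
  have hmap : (List.range b).map ((fun i => PySem.List.pyGetD t i 0) ∘ (fun k : ℕ => (a : Int) + k)) =
      (List.range b).map (fun k => t.getD (a + k) 0) := by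
    apply List.map_congr_left
    intro k _
    simp only [Function.comp_apply]
    rw [show ((a : Int) + k) = ((a + k : ℕ) : Int) by push_cast; ring, PySem.List.pyGetD_natCast]
  rw [hmap, pv_sum_range_window t a b hab]
  rw [show ((a : Int) + b) = ((a + b : ℕ) : Int) by push_cast; ring]
  rw [pvPrefix_getD t (a + b) hab, pvPrefix_getD t a (by omega)]
  ring

-- ---- the three loops ----
theorem pv_loop3_eq (t2 : List Int) (N x suma1 : Int) (hx : 1 ≤ x)
    (hN : N - 1 ≤ (t2.length : Int)) (s : Int) (hs : 0 ≤ s) :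
    pvLoop3 t2 N x suma1 (PySem.List.pyRange s (N - 1)) =
      (PySem.List.pyRange s (N - x)).any (fun s2 =>
        pvIsP2 (suma1 + (PySem.List.pyGetD (pvPrefix t2) (s2 + x) 0 -
                         PySem.List.pyGetD (pvPrefix t2) s2 0))) := by
  by_cases hend : N - 1 ≤ s
  · rw [PySem.List.pyRange_one_eq_nil hend, PySem.List.pyRange_one_eq_nil (by omega)]
    simp [pvLoop3]
  · rw [PySem.List.pyRange_one_cons (by omega)]
    by_cases hbreak : N ≤ s + x
    · rw [PySem.List.pyRange_one_eq_nil (show N - x ≤ s by omega)]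
      simp only [pvLoop3]
      rw [if_pos (show s + x ≥ N by omega)]
      simp
    · have hrec := pv_loop3_eq t2 N x suma1 hx hN (s + 1) (by omega)
      rw [PySem.List.pyRange_one_cons (show s < N - x by omega)]
      simp only [pvLoop3, List.any_cons]
      rw [if_neg (show ¬ s + x ≥ N by omega)]
      rw [pv_window_sum t2 s x hs (by omega) (by omega)]
      rw [pv_pred_eq]
      rw [hrec]
      split
      · rename_i h; simp [h]
      · rename_i h
        simp only [Bool.not_eq_true] at h
        simp [h]
termination_by (N - 1 - s).toNat
decreasing_by omega

theorem pv_loop2_eq (t1 t2 : List Int) (N x : Int) (hx : 1 ≤ x)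
    (hN1 : (t1.length : Int) = N) (hN : N - 1 ≤ (t2.length : Int)) (s : Int) (hs : 0 ≤ s) :
    pvLoop2 t1 t2 N x (PySem.List.pyRange s (N - 1)) =
      (PySem.List.pyRange s (N - x)).any (fun s1 =>
        (PySem.List.pyRange 0 (N - x)).any (fun s2 =>
          pvIsP2 (PySem.List.pyGetD (pvPrefix t1) (s1 + x) 0 - PySem.List.pyGetD (pvPrefix t1) s1 0 +
                  PySem.List.pyGetD (pvPrefix t2) (s2 + x) 0 - PySem.List.pyGetD (pvPrefix t2) s2 0))) := by
  by_cases hend : N - 1 ≤ s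
  · rw [PySem.List.pyRange_one_eq_nil hend, PySem.List.pyRange_one_eq_nil (by omega)]
    simp [pvLoop2]
  · rw [PySem.List.pyRange_one_cons (by omega)]
    by_cases hbreak : N ≤ s + x
    · rw [PySem.List.pyRange_one_eq_nil (show N - x ≤ s by omega)]
      simp only [pvLoop2]
      rw [if_pos (show s + x ≥ N by omega)]
      simp
    · have hrec := pv_loop2_eq t1 t2 N x hx hN1 hN (s + 1) (by omega)
      rw [PySem.List.pyRange_one_cons (show s < N - x by omega)]
      simp only [pvLoop2, List.any_cons]
      rw [if_neg (show ¬ s + x ≥ N by omega)]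
      rw [pv_window_sum t1 s x hs (by omega) (by omega)]
      rw [pv_loop3_eq t2 N x _ hx hN 0 le_rfl]
      rw [hrec]
      have hfun : (fun s2 => pvIsP2 (PySem.List.pyGetD (pvPrefix t1) (s + x) 0 -
            PySem.List.pyGetD (pvPrefix t1) s 0 +
            (PySem.List.pyGetD (pvPrefix t2) (s2 + x) 0 - PySem.List.pyGetD (pvPrefix t2) s2 0))) =
          (fun s2 => pvIsP2 (PySem.List.pyGetD (pvPrefix t1) (s + x) 0 -
            PySem.List.pyGetD (pvPrefix t1) s 0 +
            PySem.List.pyGetD (pvPrefix t2) (s2 + x) 0 - PySem.List.pyGetD (pvPrefix t2) s2 0)) := by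
        funext s2
        congr 1
        ring
      rw [hfun]
      split
      · rename_i h; simp [h]
      · rename_i h
        simp only [Bool.not_eq_true] at h
        simp [h]
termination_by (N - 1 - s).toNat
decreasing_by omega

theorem pv_loop1_eq (t1 t2 : List Int) (N : Int) (hN1 : (t1.length : Int) = N)
    (hN : N - 1 ≤ (t2.length : Int)) (xs : List Int) (hxs : ∀ x ∈ xs, 1 ≤ x) :
    pvLoop1 t1 t2 N xs =
      xs.any (fun x =>
        (PySem.List.pyRange 0 (N - x)).any (fun s1 =>
          (PySem.List.pyRange 0 (N - x)).any (fun s2 =>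
            pvIsP2 (PySem.List.pyGetD (pvPrefix t1) (s1 + x) 0 - PySem.List.pyGetD (pvPrefix t1) s1 0 +
                    PySem.List.pyGetD (pvPrefix t2) (s2 + x) 0 - PySem.List.pyGetD (pvPrefix t2) s2 0)))) := by
  revert hxs
  induction xs with
  | nil => intro _; simp [pvLoop1]
  | cons x rest ih =>
    intro hxs
    simp only [pvLoop1, List.any_cons]
    rw [pv_loop2_eq t1 t2 N x (hxs x (by simp)) hN1 hN 0 le_rfl]
    rw [ih (fun y hy => hxs y (by simp [hy]))]
    split
    · rename_i h; simp [h]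
    · rename_i h
      simp only [Bool.not_eq_true] at h
      simp [h]

-- ===== VERDICT (by name: the statement is the Claim_ definition above) =====
theorem ex6_spec : Claim_equal_ex6 := by
  unfold Claim_equal_ex6
  intro t1 t2 _ hpre
  unfold Pre_ex6 at hpre
  unfold Spec_ex6 ex6 ex6_alt
  simp only [PySem.List.len_eq]
  rw [pv_loop1_eq t1 t2 (t1.length : Int) rfl (by omega)]
  intro x hx
  exact (PySem.List.mem_pyRange_one.mp hx).1
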